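-- pv_equiv track=rewrite | github.com/hycap-academy/cc | 2019A10.py | checkHorzBlocks
-- ===== SOURCE A (Python) =====
-- def checkHorzBlocks(row1):
--     HorzBlocks = []
--     for i in range(0, len(row1)):
--         if row1[i]=="#":
--             HorzBlocks.append(i)
--         else:
--             if len(HorzBlocks) > 1:
--                 return HorzBlocks
--             else:
--                 HorzBlocks.clear()
--     return HorzBlocks
-- ===== SOURCE B (Python) =====
-- def checkHorzBlocks(row1):
--     # Phase 1: build the maximal runs of equal cells as (char, start, length).
--     runs = []
--     cur = None
--     for i, c in enumerate(row1):
--         if cur is not None and cur[0] == c: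
--             cur = (cur[0], cur[1], cur[2] + 1)
--         else:
--             if cur is not None:
--                 runs.append(cur)
--             cur = (c, i, 1)
--     if cur is not None:
--         runs.append(cur)
--     # Phase 2: return the indices of the first '#' run longer than one cell.
--     for c, s, l in runs:
--         if c == "#" and l > 1:
--             return list(range(s, s + l))
--     return []
-- ===== Notes on version B (the rewrite author's own statement) =====
-- stated objective: idiomatic
-- what changed: Replaces A's single interleaved append/clear/early-return scan with a two-phase structure: first build all maximal runs (char, start, length), then select the first '#' run of length > 1.
-- intended difference: On rows that end in '#' but contain no two adjacent '#' (so the trailing '#' run has length 1), A returns the singleton holding the last index while B returns an empty list; B's value is intended because a lone '#' is not a block of more than one cell and A itself discards exactly such lone runs everywhere else in the row. — e.g. on checkHorzBlocks(["#"]): A returns [0], B returns []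
import Mathlib
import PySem

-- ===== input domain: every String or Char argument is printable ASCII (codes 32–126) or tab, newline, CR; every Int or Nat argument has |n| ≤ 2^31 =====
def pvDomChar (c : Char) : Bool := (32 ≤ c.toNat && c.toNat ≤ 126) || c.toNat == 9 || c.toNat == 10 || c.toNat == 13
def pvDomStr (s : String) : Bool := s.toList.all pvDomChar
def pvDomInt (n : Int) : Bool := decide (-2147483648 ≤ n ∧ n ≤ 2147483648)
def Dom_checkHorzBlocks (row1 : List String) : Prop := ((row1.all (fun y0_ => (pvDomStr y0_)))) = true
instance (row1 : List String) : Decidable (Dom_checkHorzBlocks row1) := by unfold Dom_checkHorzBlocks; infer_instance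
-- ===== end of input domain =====

-- B replaces A's interleaved append/clear/early-return scan by a two-phase
-- build-all-runs-then-select decomposition (objective: idiomatic); on rows ending
-- in a lone '#' the two differ as stated at D_checkHorzBlocks below.

-- ===== PORT A =====
-- A's loop over indices with the mutable HorzBlocks accumulator and early return.
def pvGoA : List String → Int → List Int → List Int
  | [], _, acc => acc
  | c :: rest, i, acc =>
    if c = "#" then pvGoA rest (i + 1) (acc ++ [i])
    else if acc.length > 1 then acc
    else pvGoA rest (i + 1) []

def checkHorzBlocks (row1 : List String) : List Int := pvGoA row1 0 []

-- ===== PORT B =====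
-- Phase 1 of Source B: build maximal runs (char, start, length), carrying the pending run `cur`.
def pvGoRuns : List String → Int → Option (String × Int × Int) →
    List (String × Int × Int) → List (String × Int × Int)
  | [], _, cur, runs =>
    match cur with
    | none => runs
    | some r => runs ++ [r]
  | c :: rest, i, cur, runs =>
    match cur with
    | some (c0, s, l) =>
      if c0 = c then pvGoRuns rest (i + 1) (some (c0, s, l + 1)) runs
      else pvGoRuns rest (i + 1) (some (c, i, 1)) (runs ++ [(c0, s, l)])
    | none => pvGoRuns rest (i + 1) (some (c, i, 1)) runs

-- Phase 2 of Source B: the first '#' run of length > 1.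
def pvSelect : List (String × Int × Int) → List Int
  | [] => []
  | (c, s, l) :: rest =>
    if c = "#" ∧ l > 1 then PySem.List.pyRange s (s + l) 1
    else pvSelect rest

def checkHorzBlocks_alt (row1 : List String) : List Int :=
  pvSelect (pvGoRuns row1 0 none [])

-- ===== PRECONDITION & SPEC =====
-- On rows that end in '#' but contain no two adjacent '#' (trailing '#' run of
-- length 1), A returns the singleton holding the last index while B returns an
-- empty list; B's value is intended, since a lone '#' is not a block of more than
-- one cell and A itself discards exactly such lone runs everywhere else in the row.
def D_checkHorzBlocks (row1 : List String) : Prop :=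
  row1.getLast? = some "#" ∧
  (row1.zip row1.tail).all (fun p => !(p.1 == "#" && p.2 == "#")) = true
instance (row1 : List String) : Decidable (D_checkHorzBlocks row1) := by
  unfold D_checkHorzBlocks; infer_instance

def Spec_checkHorzBlocks (row1 : List String) (out : List Int) : Prop :=
  ¬ D_checkHorzBlocks row1 → out = checkHorzBlocks_alt row1
instance (row1 : List String) (out : List Int) : Decidable (Spec_checkHorzBlocks row1 out) := by
  unfold Spec_checkHorzBlocks; infer_instance

def pvDiffWitness_checkHorzBlocks : List String := ["#"]
def pvDiffWitnessOut_checkHorzBlocks : (List Int) × (List Int) := ([0], [])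

-- ===== CLAIM (what is proved, stated in full; the proofs are below) =====
def Claim_unchanged_checkHorzBlocks : Prop := ∀ (row1 : List String), Dom_checkHorzBlocks row1 → Spec_checkHorzBlocks row1 (checkHorzBlocks row1)
def Claim_changed_checkHorzBlocks : Prop := Dom_checkHorzBlocks (pvDiffWitness_checkHorzBlocks) ∧ D_checkHorzBlocks (pvDiffWitness_checkHorzBlocks) ∧ checkHorzBlocks (pvDiffWitness_checkHorzBlocks) = pvDiffWitnessOut_checkHorzBlocks.1 ∧ checkHorzBlocks_alt (pvDiffWitness_checkHorzBlocks) = pvDiffWitnessOut_checkHorzBlocks.2 ∧ pvDiffWitnessOut_checkHorzBlocks.1 ≠ pvDiffWitnessOut_checkHorzBlocks.2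
def Claim_exact_checkHorzBlocks : Prop := ∀ (row1 : List String), Dom_checkHorzBlocks row1 → D_checkHorzBlocks row1 → checkHorzBlocks row1 ≠ checkHorzBlocks_alt row1

-- ===== LEMMAS AND PROOFS =====

-- the two-state "row ends in a lone '#'" automaton (b = currently inside a '#' run of length exactly 1)
def pvLone : List String → Bool → Bool
  | [], b => b
  | c :: r, b =>
    if c = "#" then (if b then false else pvLone r true) else pvLone r false

theorem pvLone_true_eq (c : String) (r : List String) :
    pvLone (c :: r) true = ((c ≠ "#") && pvLone (c :: r) false) := by
  by_cases h : c = "#" <;> simp [pvLone, h]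

-- pvLone _ false is exactly D_
theorem pvLone_false_iff (xs : List String) :
    pvLone xs false = true ↔ D_checkHorzBlocks xs := by
  induction xs with
  | nil => simp [pvLone, D_checkHorzBlocks]
  | cons c r ih =>
    by_cases h : c = "#"
    · subst h
      cases r with
      | nil => simp [pvLone, D_checkHorzBlocks]
      | cons d r' =>
        rw [show pvLone ("#" :: d :: r') false = pvLone (d :: r') true by
          simp [pvLone], pvLone_true_eq]
        by_cases hd : d = "#"
        · subst hd
          simp [D_checkHorzBlocks]
        · rw [Bool.and_eq_true, ih]
          unfold D_checkHorzBlocks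
          simp [List.getLast?_cons_cons, hd]
    · cases r with
      | nil => simp [pvLone, D_checkHorzBlocks, h]
      | cons d r' =>
        rw [show pvLone (c :: d :: r') false = pvLone (d :: r') false by
          simp [pvLone, h], ih]
        unfold D_checkHorzBlocks
        simp [List.getLast?_cons_cons, h]

theorem pvGoRuns_acc (xs : List String) : ∀ (i : Int) (cur : Option (String × Int × Int))
    (runs : List (String × Int × Int)),
    pvGoRuns xs i cur runs = runs ++ pvGoRuns xs i cur [] := by
  induction xs with
  | nil => intro i cur runs; cases cur <;> simp [pvGoRuns]
  | cons c rest ih =>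
    intro i cur runs
    cases cur with
    | none => simp only [pvGoRuns]; exact ih _ _ _
    | some r =>
      obtain ⟨c0, s, l⟩ := r
      by_cases h : c0 = c
      · simp only [pvGoRuns, if_pos h]; exact ih _ _ _
      · simp only [pvGoRuns, if_neg h, List.nil_append]
        rw [ih _ _ (runs ++ [(c0, s, l)]), ih _ _ [(c0, s, l)]]
        simp

theorem pvSelect_skip (c : String) (s l : Int) (rest : List (String × Int × Int))
    (h : ¬(c = "#" ∧ l > 1)) :
    pvSelect ((c, s, l) :: rest) = pvSelect rest := by
  simp only [pvSelect, if_neg h]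

-- the invariant linking A's accumulator to B's pending run
def pvInv (acc : List Int) (cur : Option (String × Int × Int)) (i : Int) : Prop :=
  (acc = [] ∧ (cur = none ∨ ∃ c0 s l, cur = some (c0, s, l) ∧ c0 ≠ "#")) ∨
  (∃ (s : Int) (n : ℕ), cur = some ("#", s, (n : Int)) ∧
      acc = PySem.List.pyRange s (s + n) 1 ∧ i = s + n ∧ 1 ≤ n)

-- "the scan of xs from the state described by cur ends with a lone trailing '#' run
-- and never early-returns": a pending '#' run of length ≥ 2 can never end lone
def pvCond : Option (String × Int × Int) → List String → Bool
  | none, xs => pvLone xs false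
  | some (c, _, l), xs =>
    if c = "#" then (if l = 1 then pvLone xs true else false) else pvLone xs false

theorem pvInv_fresh (i : Int) :
    pvInv [i] (some ("#", i, 1)) (i + 1) := by
  refine Or.inr ⟨i, 1, ?_, ?_, ?_, le_refl 1⟩
  · norm_num
  · norm_num [PySem.List.pyRange_one_singleton]
  · norm_num

theorem pvMain (xs : List String) : ∀ (i : Int) (acc : List Int)
    (cur : Option (String × Int × Int)), pvInv acc cur i →
    pvCond cur xs = false →
    pvGoA xs i acc = pvSelect (pvGoRuns xs i cur []) := by
  induction xs with
  | nil =>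
    intro i acc cur hinv hL
    rcases hinv with ⟨hacc, hcur | ⟨c0, s, l, hcur, hc0⟩⟩ | ⟨s, n, hcur, hacc, hi, hn⟩
    · subst hacc hcur; simp [pvGoA, pvGoRuns, pvSelect]
    · subst hacc hcur
      simp only [pvGoA, pvGoRuns, List.nil_append]
      rw [pvSelect_skip _ _ _ _ (by simp [hc0])]
      simp [pvSelect]
    · subst hcur hacc hi
      simp only [pvCond, if_pos rfl] at hL
      have hgt : ¬ ((n : Int) = 1) := by
        intro h; rw [if_pos h] at hL; simp [pvLone] at hL
      have hn2 : 1 < (n : Int) := by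
        have : (1 : Int) ≤ n := by exact_mod_cast hn
        omega
      simp [pvGoA, pvGoRuns, pvSelect, hn2]
  | cons c rest ih =>
    intro i acc cur hinv hL
    by_cases hc : c = "#"
    · subst hc
      rcases hinv with ⟨hacc, hcur | ⟨c0, s, l, hcur, hc0⟩⟩ | ⟨s, n, hcur, hacc, hi, hn⟩
      · subst hacc hcur
        simp only [pvCond, pvLone, if_pos rfl] at hL
        simp only [pvGoA, if_pos rfl, pvGoRuns, List.nil_append]
        exact ih _ _ _ (pvInv_fresh i) (by simpa [pvCond] using hL)
      · subst hacc hcur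
        simp only [pvCond, if_neg hc0, pvLone, if_pos rfl] at hL
        simp only [pvGoA, if_pos rfl, pvGoRuns, if_neg hc0, List.nil_append]
        rw [pvGoRuns_acc, List.singleton_append, pvSelect_skip _ _ _ _ (by simp [hc0])]
        exact ih _ _ _ (pvInv_fresh i) (by simpa [pvCond] using hL)
      · subst hcur hacc hi
        simp only [pvGoA, if_pos rfl, pvGoRuns, if_pos rfl]
        have hstep : PySem.List.pyRange s (s + (n : Int)) 1 ++ [s + (n : Int)] =
            PySem.List.pyRange s (s + ((n : Int) + 1)) 1 := by
          rw [show s + ((n : Int) + 1) = (s + n) + 1 by ring,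
            PySem.List.pyRange_one_succ_right (by omega)]
        rw [hstep]
        have hL' : pvCond (some ("#", s, (n : Int) + 1)) rest = false := by
          have hne1 : ¬((n : Int) + 1 = 1) := by omega
          simp [pvCond, hne1]
        have := ih (s + (n : Int) + 1) (PySem.List.pyRange s (s + ((n : Int) + 1)) 1)
          (some ("#", s, (n : Int) + 1))
          (Or.inr ⟨s, n + 1, by push_cast; ring_nf, rfl, by push_cast; ring, by omega⟩) hL'
        rw [show s + ((n:Int) + 1) = s + (n:Int) + 1 by ring] at this ⊢
        exact this
    · rcases hinv with ⟨hacc, hcur | ⟨c0, s, l, hcur, hc0⟩⟩ | ⟨s, n, hcur, hacc, hi, hn⟩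
      · subst hacc hcur
        simp only [pvCond, pvLone, if_neg hc] at hL
        simp only [pvGoA, if_neg hc, List.length_nil, pvGoRuns, List.nil_append]
        rw [if_neg (by norm_num)]
        exact ih _ _ _ (Or.inl ⟨rfl, Or.inr ⟨c, i, 1, rfl, hc⟩⟩)
          (by simpa [pvCond, hc] using hL)
      · subst hacc hcur
        simp only [pvCond, if_neg hc0, pvLone, if_neg hc] at hL
        simp only [pvGoA, if_neg hc, List.length_nil, pvGoRuns, List.nil_append]
        rw [if_neg (by norm_num)]
        by_cases he : c0 = c
        · rw [if_pos he]
          exact ih _ _ _ (Or.inl ⟨rfl, Or.inr ⟨c0, s, l + 1, rfl, hc0⟩⟩)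
            (by simpa [pvCond, hc0] using hL)
        · rw [if_neg he, pvGoRuns_acc, List.singleton_append,
            pvSelect_skip _ _ _ _ (by simp [hc0])]
          exact ih _ _ _ (Or.inl ⟨rfl, Or.inr ⟨c, i, 1, rfl, hc⟩⟩)
            (by simpa [pvCond, hc] using hL)
      · subst hcur hacc hi
        have hlen : (PySem.List.pyRange s (s + (n : Int)) 1).length = n := by
          rw [PySem.List.length_pyRange_one]; omega
        simp only [pvGoA, if_neg hc, hlen, pvGoRuns, List.nil_append]
        have hne : "#" ≠ c := fun h => hc h.symm
        rw [if_neg hne, pvGoRuns_acc, List.singleton_append]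
        by_cases hgt : n > 1
        · rw [if_pos hgt]
          have h1 : ((n : Int)) > 1 := by exact_mod_cast hgt
          simp [pvSelect, h1]
        · rw [if_neg hgt]
          have hn1 : n = 1 := by omega
          subst hn1
          simp only [pvCond, if_pos rfl, Nat.cast_one, if_pos rfl, pvLone, if_neg hc] at hL
          rw [pvSelect_skip _ _ _ _ (by norm_num)]
          exact ih _ _ _ (Or.inl ⟨rfl, Or.inr ⟨c, s + 1, 1, rfl, hc⟩⟩)
            (by simpa [pvCond, hc] using hL)

theorem pvTight (xs : List String) : ∀ (i : Int) (acc : List Int)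
    (cur : Option (String × Int × Int)), pvInv acc cur i →
    pvCond cur xs = true →
    pvGoA xs i acc ≠ [] ∧ pvSelect (pvGoRuns xs i cur []) = [] := by
  induction xs with
  | nil =>
    intro i acc cur hinv hL
    rcases hinv with ⟨hacc, hcur | ⟨c0, s, l, hcur, hc0⟩⟩ | ⟨s, n, hcur, hacc, hi, hn⟩
    · subst hacc hcur; simp [pvCond, pvLone] at hL
    · subst hacc hcur; simp [pvCond, hc0, pvLone] at hL
    · subst hcur hacc hi
      simp only [pvCond, if_pos rfl] at hL
      have hn1 : (n : Int) = 1 := by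
        by_contra h; rw [if_neg h] at hL; exact absurd hL (by simp)
      have hn1' : n = 1 := by exact_mod_cast hn1
      subst hn1'
      constructor
      · simp [pvGoA, PySem.List.pyRange_one_singleton]
      · simp only [pvGoRuns, List.nil_append, Nat.cast_one]
        rw [pvSelect_skip _ _ _ _ (by norm_num)]
        simp [pvSelect]
  | cons c rest ih =>
    intro i acc cur hinv hL
    by_cases hc : c = "#"
    · subst hc
      rcases hinv with ⟨hacc, hcur | ⟨c0, s, l, hcur, hc0⟩⟩ | ⟨s, n, hcur, hacc, hi, hn⟩
      · subst hacc hcur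
        simp only [pvCond, pvLone, if_pos rfl] at hL
        simp only [pvGoA, if_pos rfl, pvGoRuns, List.nil_append]
        exact ih _ _ _ (pvInv_fresh i) (by simpa [pvCond] using hL)
      · subst hacc hcur
        simp only [pvCond, if_neg hc0, pvLone, if_pos rfl] at hL
        simp only [pvGoA, if_pos rfl, pvGoRuns, if_neg hc0, List.nil_append]
        rw [pvGoRuns_acc, List.singleton_append, pvSelect_skip _ _ _ _ (by simp [hc0])]
        exact ih _ _ _ (pvInv_fresh i) (by simpa [pvCond] using hL)
      · subst hcur hacc hi
        exfalso
        simp only [pvCond, if_pos rfl] at hL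
        by_cases h1 : (n : Int) = 1
        · rw [if_pos h1] at hL; simp [pvLone] at hL
        · rw [if_neg h1] at hL; exact absurd hL (by simp)
    · rcases hinv with ⟨hacc, hcur | ⟨c0, s, l, hcur, hc0⟩⟩ | ⟨s, n, hcur, hacc, hi, hn⟩
      · subst hacc hcur
        simp only [pvCond, pvLone, if_neg hc] at hL
        simp only [pvGoA, if_neg hc, List.length_nil, pvGoRuns, List.nil_append]
        rw [if_neg (by norm_num)]
        exact ih _ _ _ (Or.inl ⟨rfl, Or.inr ⟨c, i, 1, rfl, hc⟩⟩)
          (by simpa [pvCond, hc] using hL)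
      · subst hacc hcur
        simp only [pvCond, if_neg hc0, pvLone, if_neg hc] at hL
        simp only [pvGoA, if_neg hc, List.length_nil, pvGoRuns, List.nil_append]
        rw [if_neg (by norm_num)]
        by_cases he : c0 = c
        · rw [if_pos he]
          exact ih _ _ _ (Or.inl ⟨rfl, Or.inr ⟨c0, s, l + 1, rfl, hc0⟩⟩)
            (by simpa [pvCond, hc0] using hL)
        · rw [if_neg he, pvGoRuns_acc, List.singleton_append,
            pvSelect_skip _ _ _ _ (by simp [hc0])]
          exact ih _ _ _ (Or.inl ⟨rfl, Or.inr ⟨c, i, 1, rfl, hc⟩⟩)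
            (by simpa [pvCond, hc] using hL)
      · subst hcur hacc hi
        simp only [pvCond, if_pos rfl] at hL
        have hn1 : (n : Int) = 1 := by
          by_contra h; rw [if_neg h] at hL; exact absurd hL (by simp)
        have hn1' : n = 1 := by exact_mod_cast hn1
        subst hn1'
        simp only [Nat.cast_one, if_true, if_pos rfl, pvLone, if_neg hc] at hL
        have hlen : (PySem.List.pyRange s (s + (1 : ℕ)) 1).length = 1 := by
          rw [PySem.List.length_pyRange_one]; omega
        simp only [pvGoA, if_neg hc, hlen, pvGoRuns, List.nil_append]
        rw [if_neg (by norm_num)]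
        have hne : "#" ≠ c := fun h => hc h.symm
        rw [if_neg hne, pvGoRuns_acc, List.singleton_append,
          pvSelect_skip _ _ _ _ (by norm_num)]
        exact ih _ _ _ (Or.inl ⟨rfl, Or.inr ⟨c, s + 1, 1, rfl, hc⟩⟩)
          (by simpa [pvCond, hc] using hL)

-- ===== VERDICT (by name: the statement is the Claim_ definition above) =====
theorem checkHorzBlocks_spec : Claim_unchanged_checkHorzBlocks := by
  intro row1 _
  unfold Spec_checkHorzBlocks checkHorzBlocks checkHorzBlocks_alt
  intro hD
  have hL : pvLone row1 false = false := by
    rcases h : pvLone row1 false with _ | _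
    · rfl
    · exact absurd ((pvLone_false_iff row1).mp h) hD
  exact pvMain row1 0 [] none (Or.inl ⟨rfl, Or.inl rfl⟩) (by simpa [pvCond] using hL)

theorem checkHorzBlocks_changed : Claim_changed_checkHorzBlocks := by
  unfold Claim_changed_checkHorzBlocks; decide

theorem checkHorzBlocks_tight : Claim_exact_checkHorzBlocks := by
  intro row1 _ hD
  have hL : pvLone row1 false = true := (pvLone_false_iff row1).mpr hD
  have h := pvTight row1 0 [] none (Or.inl ⟨rfl, Or.inl rfl⟩) (by simpa [pvCond] using hL)
  unfold checkHorzBlocks checkHorzBlocks_alt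
  intro heq
  exact h.1 (heq.trans h.2)
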